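-- pv_equiv track=rewrite | github.com/AlgoZenithNITC/GFG_POTD_Solutions_AlgoZenithNITC | 16-07-2024_Remaining_String.py | printString
-- ===== SOURCE A (Python) =====
-- def printString(s, ch, count):
--     i = 0
--     while i < len(s) and count != 0:
--         if s[i] == ch:
--             count -= 1
--         i += 1
--
--     result = s[i:]
--
--     return result if result != "" else ""
-- ===== SOURCE B (Python) =====
-- def printString(s, ch, count):
--     if count == 0:
--         return s
--     positions = [i for i, c in enumerate(s) if c == ch]
--     if 0 < count <= len(positions):
--         return s[positions[count - 1] + 1:]
--     return ""
-- ===== Notes on version B (the rewrite author's own statement) =====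
-- stated objective: simpler
-- what changed: B replaces A's stateful character-by-character while-loop (mutating i and count) with a one-shot comprehension collecting all occurrence indices of ch followed by a direct index lookup and a single slice.
import Mathlib
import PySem

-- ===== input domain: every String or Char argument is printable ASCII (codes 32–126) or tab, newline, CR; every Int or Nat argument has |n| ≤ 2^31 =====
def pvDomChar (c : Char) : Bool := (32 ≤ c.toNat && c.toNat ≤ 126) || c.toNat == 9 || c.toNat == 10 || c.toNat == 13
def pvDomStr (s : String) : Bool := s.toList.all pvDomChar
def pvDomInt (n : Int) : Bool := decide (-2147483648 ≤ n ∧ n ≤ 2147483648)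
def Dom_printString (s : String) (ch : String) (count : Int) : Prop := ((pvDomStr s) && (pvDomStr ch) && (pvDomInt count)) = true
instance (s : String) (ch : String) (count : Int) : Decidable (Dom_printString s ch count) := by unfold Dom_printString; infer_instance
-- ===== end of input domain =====

-- B replaces A's stateful character-by-character while-loop with a one-shot list of
-- occurrence indices followed by a direct lookup and a single slice (objective: simpler).

-- ===== PORT A =====
-- the while loop: state (i, count); we recurse on the suffix s[i:] instead of the index i
def printAGo (ch : String) : List Char → Int → List Char
  | [], _ => []
  | c :: rest, count =>
      if count = 0 then c :: rest
      else printAGo ch rest (if String.singleton c == ch then count - 1 else count)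

def printString (s : String) (ch : String) (count : Int) : String :=
  let result := String.ofList (printAGo ch s.toList count)
  if result ≠ "" then result else ""

-- ===== PORT B =====
def printString_alt (s : String) (ch : String) (count : Int) : String :=
  if count = 0 then s
  else
    let positions := ((PySem.List.enumerate s.toList 0).filter
        (fun p => String.singleton p.2 == ch)).map (·.1)
    if 0 < count ∧ count ≤ (positions.length : Int) then
      match PySem.List.pyGet? positions (count - 1) with
      | some p => String.ofList (PySem.List.slice s.toList (some (p + 1)) none)
      | none => ""   -- unreachable: the guard puts count - 1 in range
    else ""

-- ===== PRECONDITION & SPEC =====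
def Spec_printString (s : String) (ch : String) (count : Int) (out : String) : Prop := out = printString_alt s ch count
instance (s : String) (ch : String) (count : Int) (out : String) : Decidable (Spec_printString s ch count out) := by unfold Spec_printString; infer_instance

-- ===== CLAIM (what is proved, stated in full; the proofs are below) =====
def Claim_equal_printString : Prop := ∀ (s : String) (ch : String) (count : Int), Dom_printString s ch count → Spec_printString s ch count (printString s ch count)

-- ===== LEMMAS AND PROOFS =====

def posL (ch : String) (cs : List Char) : List Int :=
  ((PySem.List.enumerate cs 0).filter (fun p => String.singleton p.2 == ch)).map (·.1)

def altL (ch : String) (cs : List Char) (count : Int) : List Char :=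
  if 0 < count ∧ count ≤ ((posL ch cs).length : Int) then
    match PySem.List.pyGet? (posL ch cs) (count - 1) with
    | some p => PySem.List.slice cs (some (p + 1)) none
    | none => []
  else []

theorem ite_ne_empty (r : String) : (if r ≠ "" then r else "") = r := by
  by_cases h : r = "" <;> simp [h]

theorem enum_shift (f : Char → Bool) (xs : List Char) : ∀ (t : Int),
    ((PySem.List.enumerate xs t).filter (fun p => f p.2)).map (·.1)
      = (((PySem.List.enumerate xs 0).filter (fun p => f p.2)).map (·.1)).map (· + t) := by
  induction xs with
  | nil => intro t; simp [PySem.List.enumerate_nil]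
  | cons x xs ih =>
    intro t
    simp only [PySem.List.enumerate_cons]
    by_cases hf : f x
    · simp [hf, ih (t + 1), ih 1, List.map_map, Function.comp]
      intro a b _ _; omega
    · simp [hf, ih (t + 1), ih 1, List.map_map, Function.comp]
      intro a b _ _; omega

theorem posL_cons (ch : String) (c : Char) (cs : List Char) :
    posL ch (c :: cs) = if String.singleton c == ch
      then (0 : Int) :: (posL ch cs).map (· + 1)
      else (posL ch cs).map (· + 1) := by
  unfold posL
  simp only [PySem.List.enumerate_cons]
  by_cases hf : String.singleton c == ch
  · simp [hf, enum_shift (fun d => String.singleton d == ch) cs 1]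
  · simp [hf, enum_shift (fun d => String.singleton d == ch) cs 1]

theorem posL_nonneg (ch : String) (cs : List Char) : ∀ p ∈ posL ch cs, 0 ≤ p := by
  induction cs with
  | nil => simp [posL, PySem.List.enumerate_nil]
  | cons c cs ih =>
    intro p hp
    rw [posL_cons] at hp
    by_cases hf : String.singleton c == ch
    · simp [hf] at hp
      rcases hp with h | ⟨q, hq, rfl⟩
      · omega
      · have := ih q hq; omega
    · simp [hf] at hp
      rcases hp with ⟨q, hq, rfl⟩
      have := ih q hq; omega

theorem go_neg (ch : String) (cs : List Char) : ∀ (count : Int), count < 0 →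
    printAGo ch cs count = [] := by
  induction cs with
  | nil => intro count _; rfl
  | cons c cs ih =>
    intro count hc
    rw [printAGo]
    rw [if_neg (by omega)]
    by_cases hf : String.singleton c == ch <;> simp [hf] <;> exact ih _ (by omega)

theorem go_zero (ch : String) (cs : List Char) : printAGo ch cs 0 = cs := by
  cases cs <;> simp [printAGo]

theorem main_pos (ch : String) (cs : List Char) : ∀ (count : Int), 0 < count →
    printAGo ch cs count = altL ch cs count := by
  induction cs with
  | nil =>
    intro count hc
    rw [printAGo, altL]
    rw [if_neg (by simp [posL, PySem.List.enumerate_nil])]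
  | cons c cs ih =>
    intro count hc
    rw [printAGo, if_neg (by omega)]
    by_cases hf : String.singleton c == ch
    · rw [if_pos hf]
      by_cases h1 : count = 1
      · subst h1
        rw [show (1:Int) - 1 = 0 from rfl, go_zero, altL, posL_cons, if_pos hf]
        rw [if_pos (by simp)]
        simp [PySem.List.slice_from_one]
      · have h2 : 2 ≤ count := by omega
        rw [ih (count - 1) (by omega), altL, altL, posL_cons, if_pos hf]
        by_cases hg : count - 1 ≤ ((posL ch cs).length : Int)
        · rw [if_pos ⟨by omega, by omega⟩, if_pos (⟨by omega, by simp; omega⟩ :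
              0 < count ∧ count ≤ (((0:Int) :: (posL ch cs).map (· + 1)).length : Int))]
          have hlen : (count - 1 - 1).toNat < (posL ch cs).length := by omega
          rw [PySem.List.pyGet?_eq_some_getElem (posL ch cs) (by omega) (by omega),
              PySem.List.pyGet?_eq_some_getElem ((0:Int) :: (posL ch cs).map (· + 1))
                (by omega) (by simp; omega)]
          have hidx : (count - 1).toNat = (count - 1 - 1).toNat + 1 := by omega
          simp only [hidx, List.getElem_cons_succ, List.getElem_map]
          have hp := posL_nonneg ch cs ((posL ch cs)[(count - 1 - 1).toNat])
            (List.getElem_mem hlen)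
          rw [PySem.List.slice_from _ (by omega), PySem.List.slice_from _ (by omega)]
          have he : ((posL ch cs)[(count - 1 - 1).toNat] + 1 + 1).toNat
              = ((posL ch cs)[(count - 1 - 1).toNat] + 1).toNat + 1 := by omega
          rw [he, List.drop_succ_cons]
        · rw [if_neg (by intro h; exact hg (by omega)),
              if_neg (by simp; omega)]
    · rw [if_neg hf]
      rw [ih count hc, altL, altL, posL_cons, if_neg hf]
      by_cases hg : count ≤ ((posL ch cs).length : Int)
      · rw [if_pos ⟨by omega, by omega⟩, if_pos (⟨by omega, by simp; omega⟩ :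
            0 < count ∧ count ≤ (((posL ch cs).map (· + 1)).length : Int))]
        have hlen : (count - 1).toNat < (posL ch cs).length := by omega
        rw [PySem.List.pyGet?_eq_some_getElem (posL ch cs) (by omega) (by omega),
            PySem.List.pyGet?_eq_some_getElem ((posL ch cs).map (· + 1))
              (by omega) (by simp; omega)]
        simp only [List.getElem_map]
        have hp := posL_nonneg ch cs ((posL ch cs)[(count - 1).toNat])
          (List.getElem_mem hlen)
        rw [PySem.List.slice_from _ (by omega), PySem.List.slice_from _ (by omega)]
        have he : ((posL ch cs)[(count - 1).toNat] + 1 + 1).toNat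
            = ((posL ch cs)[(count - 1).toNat] + 1).toNat + 1 := by omega
        rw [he, List.drop_succ_cons]
      · rw [if_neg (by intro h; exact hg h.2), if_neg (by simp; omega)]

theorem alt_eq (s ch : String) (count : Int) (h : count ≠ 0) :
    printString_alt s ch count = String.ofList (altL ch s.toList count) := by
  rw [printString_alt, if_neg h, altL]
  by_cases hg : 0 < count ∧ count ≤ ((posL ch s.toList).length : Int)
  · rw [if_pos (by exact hg), if_pos hg]
    cases hget : PySem.List.pyGet? (posL ch s.toList) (count - 1) with
    | none => simp [posL] at hget ⊢; rw [hget]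
    | some p => simp [posL] at hget ⊢; rw [hget]
  · rw [if_neg (by exact hg), if_neg hg]

-- ===== VERDICT (by name: the statement is the Claim_ definition above) =====
theorem printString_spec : Claim_equal_printString := by
  intro s ch count _
  unfold Spec_printString
  rw [printString, ite_ne_empty]
  by_cases h0 : count = 0
  · subst h0
    rw [go_zero, printString_alt, if_pos rfl, String.ofList_toList]
  · rw [alt_eq s ch count h0]
    rcases lt_or_gt_of_ne h0 with hlt | hgt
    · rw [go_neg ch s.toList count hlt, altL, if_neg (by omega)]
    · rw [main_pos ch s.toList count hgt]
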